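-- pv_equiv track=rewrite | github.com/BrianSuggs/pythonSummary | bioinformatics.py | computeDotPlot
-- ===== SOURCE A (Python) =====
-- def computeDotPlot(sideStr, topStr, dot_plot):
--     # Fill in the code to compute the dot plot
--     for i in range(len(sideStr)):
--         for j in range(len(topStr)):
--             if sideStr[i] == topStr[j]:
--                 dot_plot[i][j] = '*'
--             else:
--                 dot_plot[i][j] = '-'
--     return dot_plot
-- ===== SOURCE B (Python) =====
-- def computeDotPlot(sideStr, topStr, dot_plot):
--     # Memoized row patterns: the mark row depends only on the side character,
--     # so compute it once per distinct character and splice it into each row.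
--     if not topStr:
--         return dot_plot
--     n = len(topStr)
--     cache = {}
--     for i in range(len(sideStr)):
--         ch = sideStr[i]
--         pat = cache.get(ch)
--         if pat is None:
--             pat = ['*' if c == ch else '-' for c in topStr]
--             cache[ch] = pat
--         dot_plot[i][:n] = pat
--     return dot_plot
-- ===== Notes on version B (the rewrite author's own statement) =====
-- stated objective: alternative
-- what changed: Replaces the per-cell nested comparison loop by a single pass that memoizes the mark row per distinct side character in a dict and splices it into each row with one slice assignment.
import Mathlib
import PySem

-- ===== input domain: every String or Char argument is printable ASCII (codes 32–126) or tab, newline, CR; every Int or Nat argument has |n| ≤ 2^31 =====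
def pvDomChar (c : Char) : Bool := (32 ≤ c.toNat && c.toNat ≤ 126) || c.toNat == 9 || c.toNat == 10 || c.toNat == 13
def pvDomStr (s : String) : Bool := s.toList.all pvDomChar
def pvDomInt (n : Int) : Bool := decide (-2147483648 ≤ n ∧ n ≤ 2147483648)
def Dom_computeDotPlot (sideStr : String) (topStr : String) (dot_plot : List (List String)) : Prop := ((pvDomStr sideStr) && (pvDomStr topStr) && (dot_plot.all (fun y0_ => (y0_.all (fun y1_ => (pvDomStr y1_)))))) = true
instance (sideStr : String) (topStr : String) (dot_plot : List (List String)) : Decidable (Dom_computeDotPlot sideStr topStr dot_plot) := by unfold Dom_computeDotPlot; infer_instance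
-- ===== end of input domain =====

-- B memoizes the mark row per distinct side character (dict) and splices it in with one slice
-- assignment per row, instead of A's per-cell nested comparison loop; equivalence is about the
-- return value (both Pythons also mutate dot_plot's rows in place on Pre_).

-- ===== PORT A =====
-- nested for-loops, assigning dot_plot[i][j] cell by cell (List.set is the in-range assignment;
-- out-of-range assignments raise in Python and are excluded by Pre_)
def computeDotPlot (sideStr : String) (topStr : String) (dot_plot : List (List String)) : List (List String) :=
  (List.range sideStr.toList.length).foldl (fun dp i =>
    (List.range topStr.toList.length).foldl (fun dp j =>
      dp.set i ((dp.getD i []).set j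
        (if sideStr.toList.getD i ' ' = topStr.toList.getD j ' ' then "*" else "-"))) dp) dot_plot

-- ===== PORT B =====
-- the body of Source B's loop: ch = sideStr[i]; cache lookup, build and store the pattern on a miss,
-- then dot_plot[i][:n] = pat becomes 'set i (pat ++ row.drop n)'
def pvStepB (t : List Char) (s : List Char)
    (x : PySem.Dict Char (List String) × List (List String)) (i : Nat) :
    PySem.Dict Char (List String) × List (List String) :=
  let ch := s.getD i ' '
  match x.1.get? ch with
  | some pat => (x.1, x.2.set i (pat ++ (x.2.getD i []).drop t.length))
  | none =>
    let pat := t.map (fun c => if c == ch then "*" else "-")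
    (x.1.insert ch pat, x.2.set i (pat ++ (x.2.getD i []).drop t.length))

def computeDotPlot_alt (sideStr : String) (topStr : String) (dot_plot : List (List String)) : List (List String) :=
  if topStr.toList.isEmpty then dot_plot
  else
    ((List.range sideStr.toList.length).foldl
      (pvStepB topStr.toList sideStr.toList) (PySem.Dict.empty, dot_plot)).2

-- ===== PRECONDITION & SPEC =====
-- Pre_ is exactly where Python A returns: either topStr is empty (no cell is touched), or
-- dot_plot has at least len(sideStr) rows and each of those rows has at least len(topStr) cells.
def Pre_computeDotPlot (sideStr : String) (topStr : String) (dot_plot : List (List String)) : Prop :=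
  topStr.toList.length = 0 ∨
    (sideStr.toList.length ≤ dot_plot.length ∧
      ∀ r ∈ dot_plot.take sideStr.toList.length, topStr.toList.length ≤ r.length)
instance (sideStr : String) (topStr : String) (dot_plot : List (List String)) : Decidable (Pre_computeDotPlot sideStr topStr dot_plot) := by unfold Pre_computeDotPlot; infer_instance
def pvWitness_computeDotPlot : String × String × List (List String) :=
  ("aba", "ab", [[".", "."], [".", "."], [".", ".", "x"]])

def Spec_computeDotPlot (sideStr : String) (topStr : String) (dot_plot : List (List String)) (out : List (List String)) : Prop := out = computeDotPlot_alt sideStr topStr dot_plot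
instance (sideStr : String) (topStr : String) (dot_plot : List (List String)) (out : List (List String)) : Decidable (Spec_computeDotPlot sideStr topStr dot_plot out) := by unfold Spec_computeDotPlot; infer_instance

-- ===== CLAIM (what is proved, stated in full; the proofs are below) =====
def Claim_equal_computeDotPlot : Prop := ∀ (sideStr : String) (topStr : String) (dot_plot : List (List String)), Dom_computeDotPlot sideStr topStr dot_plot → Pre_computeDotPlot sideStr topStr dot_plot → Spec_computeDotPlot sideStr topStr dot_plot (computeDotPlot sideStr topStr dot_plot)

-- ===== LEMMAS AND PROOFS =====

-- the mark row B computes for side character ch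
def pvPat (t : List Char) (ch : Char) : List String :=
  t.map (fun c => if c == ch then "*" else "-")

-- the first k rows after processing: pattern of s[i] spliced over row i
def pvE (s t : List Char) (dp : List (List String)) (k : Nat) : List (List String) :=
  ((dp.take k).zip (s.take k)).map (fun p => pvPat t p.2 ++ p.1.drop t.length)

theorem pvELen (s t : List Char) (dp : List (List String)) (k : Nat)
    (hks : k ≤ s.length) (hkdp : k ≤ dp.length) : (pvE s t dp k).length = k := by
  simp only [pvE, List.length_map, List.length_zip, List.length_take]
  omega

-- setting the element right after a prefix
theorem pvSetAtLen {α : Type} (l₁ l₂ : List α) (a b : α) :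
    (l₁ ++ a :: l₂).set l₁.length b = l₁ ++ b :: l₂ := by
  rw [List.set_append]
  simp

theorem pvEGet (s t : List Char) (dp : List (List String)) (k : Nat)
    (hks : k < s.length) (hkdp : k < dp.length) :
    (pvE s t dp k ++ dp.drop k).getD k [] = dp[k] := by
  have hElen : (pvE s t dp k).length = k := pvELen s t dp k (by omega) (by omega)
  rw [List.getD_eq_getElem?_getD, List.getElem?_append_right (by omega)]
  simp [hElen, List.getElem?_drop, List.getElem?_eq_getElem hkdp]

theorem pvESet (s t : List Char) (dp : List (List String)) (k : Nat)
    (hks : k < s.length) (hkdp : k < dp.length) :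
    (pvE s t dp k ++ dp.drop k).set k (pvPat t (s.getD k ' ') ++ dp[k].drop t.length)
      = pvE s t dp (k + 1) ++ dp.drop (k + 1) := by
  have hElen : (pvE s t dp k).length = k := pvELen s t dp k (by omega) (by omega)
  rw [List.drop_eq_getElem_cons hkdp]
  calc (pvE s t dp k ++ dp[k] :: dp.drop (k + 1)).set k
          (pvPat t (s.getD k ' ') ++ dp[k].drop t.length)
      = (pvE s t dp k ++ dp[k] :: dp.drop (k + 1)).set (pvE s t dp k).length
          (pvPat t (s.getD k ' ') ++ dp[k].drop t.length) := by rw [hElen]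
    _ = pvE s t dp k ++ (pvPat t (s.getD k ' ') ++ dp[k].drop t.length) :: dp.drop (k + 1) :=
        pvSetAtLen _ _ _ _
    _ = pvE s t dp (k + 1) ++ dp.drop (k + 1) := by
        simp only [pvE]
        rw [List.take_add_one, List.take_add_one, List.getElem?_eq_getElem hkdp,
            List.getElem?_eq_getElem hks, List.zip_append (by simp; omega), List.map_append]
        simp [List.getD_eq_getElem?_getD, List.getElem?_eq_getElem hks]

-- inner row loop: setting indices 0..k-1 of a long-enough row overwrites its prefix
theorem pvSetFold (v : Nat → String) :
    ∀ (k : Nat) (r : List String), k ≤ r.length →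
      (List.range k).foldl (fun r j => r.set j (v j)) r = (List.range k).map v ++ r.drop k := by
  intro k
  induction k with
  | zero => simp
  | succ k ih =>
    intro r hk
    rw [List.range_succ, List.foldl_append, List.foldl_cons, List.foldl_nil,
        ih r (by omega), List.map_append]
    have hkr : k < r.length := by omega
    rw [List.drop_eq_getElem_cons hkr]
    have hlen : ((List.range k).map v).length = k := by simp
    calc ((List.range k).map v ++ r[k] :: r.drop (k + 1)).set k (v k)
        = ((List.range k).map v ++ r[k] :: r.drop (k + 1)).set ((List.range k).map v).length (v k) := by
          rw [hlen]
      _ = (List.range k).map v ++ v k :: r.drop (k + 1) := pvSetAtLen _ _ _ _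
      _ = (List.range k).map v ++ [k].map v ++ r.drop (k + 1) := by simp

-- A's inner loop only reads and writes row i: it collapses to one set of row i
theorem pvInnerCollapse (v : Nat → String) :
    ∀ (k : Nat) (dp : List (List String)) (i : Nat), i < dp.length →
      (List.range k).foldl (fun dp j => dp.set i ((dp.getD i []).set j (v j))) dp
        = dp.set i ((List.range k).foldl (fun r j => r.set j (v j)) (dp.getD i [])) := by
  intro k
  induction k with
  | zero =>
    intro dp i hi
    simp [List.getD_eq_getElem?_getD, List.getElem?_eq_getElem hi, List.set_getElem_self hi]
  | succ k ih =>
    intro dp i hi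
    rw [List.range_succ]
    simp only [List.foldl_append, List.foldl_cons, List.foldl_nil]
    rw [ih dp i hi]
    have hgd : ((dp.set i ((List.range k).foldl (fun r j => r.set j (v j)) (dp.getD i []))).getD i [])
        = (List.range k).foldl (fun r j => r.set j (v j)) (dp.getD i []) := by
      rw [List.getD_eq_getElem?_getD, List.getElem?_set_self (by simpa using hi)]
      rfl
    rw [hgd, List.set_set]

-- the cell value A writes in row i equals B's pattern entry
theorem pvRowMap (s t : List Char) (i : Nat) :
    (List.range t.length).map (fun j => if s.getD i ' ' = t.getD j ' ' then "*" else "-")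
      = pvPat t (s.getD i ' ') := by
  apply List.ext_getElem
  · simp [pvPat]
  · intro j h1 h2
    have hj : j < t.length := by simpa using h1
    have ht : t.getD j ' ' = t[j] := by
      simp [List.getD_eq_getElem?_getD, List.getElem?_eq_getElem hj]
    simp only [pvPat, List.getElem_map, List.getElem_range]
    rw [ht]
    by_cases h : s.getD i ' ' = t[j]
    · rw [if_pos h, if_pos (by simp [h.symm])]
    · rw [if_neg h, if_neg (by simp [beq_iff_eq]; exact fun hh => h hh.symm)]

-- A's outer loop, characterised row by row
theorem pvOuterA (s t : List Char) :
    ∀ (k : Nat) (dp : List (List String)), k ≤ s.length → s.length ≤ dp.length →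
      (∀ i (h : i < dp.length), i < s.length → t.length ≤ dp[i].length) →
      (List.range k).foldl (fun dp i =>
          (List.range t.length).foldl (fun dp j =>
            dp.set i ((dp.getD i []).set j
              (if s.getD i ' ' = t.getD j ' ' then "*" else "-"))) dp) dp
        = pvE s t dp k ++ dp.drop k := by
  intro k
  induction k with
  | zero => intro dp _ _ _; simp [pvE]
  | succ k ih =>
    intro dp hk hlen hrows
    rw [List.range_succ, List.foldl_append, List.foldl_cons, List.foldl_nil,
        ih dp (by omega) hlen hrows]
    have hkdp : k < dp.length := by omega
    have hks : k < s.length := by omega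
    have hkE : k < (pvE s t dp k ++ dp.drop k).length := by
      rw [List.length_append, pvELen s t dp k (by omega) (by omega), List.length_drop]
      omega
    rw [pvInnerCollapse _ t.length (pvE s t dp k ++ dp.drop k) k hkE,
        pvEGet s t dp k hks hkdp, pvSetFold _ t.length dp[k] (hrows k hkdp hks),
        pvRowMap s t k, pvESet s t dp k hks hkdp]

-- B's loop: the cache only ever stores correct patterns, and row i gets its pattern spliced in
theorem pvFoldB (t s : List Char) :
    ∀ (k : Nat) (dp : List (List String)) (cache : PySem.Dict Char (List String)),
      k ≤ s.length → s.length ≤ dp.length →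
      (∀ c p, cache.get? c = some p → p = pvPat t c) →
      (∀ c p, ((List.range k).foldl (pvStepB t s) (cache, dp)).1.get? c = some p → p = pvPat t c) ∧
      ((List.range k).foldl (pvStepB t s) (cache, dp)).2 = pvE s t dp k ++ dp.drop k := by
  intro k
  induction k with
  | zero => intro dp cache _ _ hinv; exact ⟨hinv, by simp [pvE]⟩
  | succ k ih =>
    intro dp cache hk hlen hinv
    obtain ⟨ihc, ihd⟩ := ih dp cache (by omega) hlen hinv
    rw [List.range_succ, List.foldl_append, List.foldl_cons, List.foldl_nil]
    have hkdp : k < dp.length := by omega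
    have hks : k < s.length := by omega
    set F := (List.range k).foldl (pvStepB t s) (cache, dp) with hF
    have hrow : F.2.getD k [] = dp[k] := by
      rw [ihd]; exact pvEGet s t dp k hks hkdp
    cases hc : F.1.get? (s.getD k ' ') with
    | some pat =>
      have hpat : pat = pvPat t (s.getD k ' ') := ihc _ _ hc
      have hstep : pvStepB t s F k = (F.1, F.2.set k (pat ++ (F.2.getD k []).drop t.length)) := by
        simp only [pvStepB]
        rw [hc]
      rw [hstep]
      refine ⟨ihc, ?_⟩
      rw [hrow, hpat, ihd, pvESet s t dp k hks hkdp]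
    | none =>
      have hstep : pvStepB t s F k
          = (F.1.insert (s.getD k ' ') (pvPat t (s.getD k ' ')),
             F.2.set k (pvPat t (s.getD k ' ') ++ (F.2.getD k []).drop t.length)) := by
        simp only [pvStepB]
        rw [hc]
        rfl
      rw [hstep]
      refine ⟨?_, ?_⟩
      · intro c p hp
        rw [PySem.Dict.get?_insert] at hp
        by_cases hcc : c = s.getD k ' '
        · subst hcc
          rw [if_pos rfl] at hp
          exact (Option.some_inj.mp hp).symm
        · rw [if_neg hcc] at hp
          exact ihc c p hp
      · rw [hrow, ihd, pvESet s t dp k hks hkdp]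

-- ===== VERDICT (by name: the statement is the Claim_ definition above) =====
theorem computeDotPlot_spec : Claim_equal_computeDotPlot := by
  intro sideStr topStr dp _ hpre
  unfold Spec_computeDotPlot computeDotPlot computeDotPlot_alt
  by_cases ht : topStr.toList = []
  · -- topStr is empty: A's inner loop is empty and B returns dot_plot unchanged
    simp [ht, List.foldl_fixed]
  · have hne : topStr.toList.isEmpty = false := by simp [ht]
    rcases hpre with h0 | ⟨hlen, hrows⟩
    · exact absurd (List.length_eq_zero_iff.mp h0) ht
    have hrows' : ∀ i (h : i < dp.length), i < sideStr.toList.length →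
        topStr.toList.length ≤ dp[i].length := by
      intro i hi his
      exact hrows dp[i] (List.mem_take_iff_getElem.mpr ⟨i, by omega, rfl⟩)
    simp only [hne, Bool.false_eq_true, if_false]
    rw [pvOuterA sideStr.toList topStr.toList sideStr.toList.length dp (le_refl _) hlen hrows',
        (pvFoldB topStr.toList sideStr.toList sideStr.toList.length dp PySem.Dict.empty
          (le_refl _) hlen (by intro c p hp; simp [PySem.Dict.get?_empty] at hp)).2]
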